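/- GENERATED by farm/mkstatement.py from design/units.tsv (unit `run_ctors`) and the Specs of Vorbis/Spec/*.lean — do not edit.
   THE STATEMENT of the proof unit `run_ctors`: the function `run_ctors` (9 instructions) satisfies its contract,
   given the contracts of its callees. What the names mean: Vorbis/Spec/Basic.lean. The theorem to prove:
   `theorem run_ctors_ok : Vorbis.Spec.run_ctors.Statement`. -/
import Vorbis.Spec.Runtime
namespace Vorbis.Spec.run_ctors
open X86 X86.User Asan

/-- The statement of unit `run_ctors`. -/
def Statement : Prop :=
  ∀ (Lay : Layout) (_hLay : Lay.hi = 0x1000000) (μ : Microarch) (_hμ : UserX.MicroOK μ) (u₀ : State)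
    (_hcode : HasCodeNat Lay u₀ Vorbis.L.run_ctors.entry Vorbis.Code.code_run_ctors.nat Vorbis.L.run_ctors.size)
    (_h_ctor : Calls Lay μ Vorbis.WayInv (Vorbis.conv u₀) Vorbis.L._sub_I_65535_1.entry (Asan.ctorSpec Vorbis.Spec.rt)),
    Calls Lay μ Vorbis.WayInv (Vorbis.conv u₀) Vorbis.L.run_ctors.entry (Asan.runCtorsSpec Vorbis.Spec.rt)

end Vorbis.Spec.run_ctors
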